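-- pv_equiv track=rewrite | github.com/godot-escoria/escoria-demo-game | tools/docstring_formatter.py | clean_doc_lines
-- ===== SOURCE A (Python) =====
-- from typing import Dict, Iterable, List, Optional, Sequence, Tuple
--
-- BR_TOKEN = "[br]"
--
-- def strip_br_suffix(text: str) -> Tuple[str, bool]:
--     """
--     Remove a trailing `[br]` token from the given string.
--     Returns a tuple of (new_text, removed_br).
--     """
--     updated = text.rstrip()
--     if updated.endswith(BR_TOKEN):
--         updated = updated[: -len(BR_TOKEN)].rstrip()
--         return updated, True
--     return text, False
--
-- def clean_doc_lines(lines: Iterable[str]) -> List[str]: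
--     cleaned: List[str] = []
--     for line in lines:
--         text = line.strip()
--         if not text:
--             cleaned.append("")
--             continue
--         # Remove `[br]` tokens because we'll re-apply them later.
--         text, _ = strip_br_suffix(text)
--         cleaned.append(text)
--     # Trim leading / trailing blank entries.
--     while cleaned and not cleaned[0]:
--         cleaned.pop(0)
--     while cleaned and not cleaned[-1]:
--         cleaned.pop()
--     return cleaned
-- ===== SOURCE B (Python) =====
-- BR_TOKEN = "[br]"
--
-- def _transform(line):
--     text = line.strip()
--     if text.endswith(BR_TOKEN):
--         text = text[: -len(BR_TOKEN)].rstrip()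
--     return text
--
-- def clean_doc_lines(lines):
--     out = []
--     pending = 0
--     for line in lines:
--         text = _transform(line)
--         if not text:
--             if out:
--                 pending += 1
--         else:
--             out.extend([""] * pending)
--             pending = 0
--             out.append(text)
--     return out
-- ===== Notes on version B (the rewrite author's own statement) =====
-- stated objective: alternative
-- what changed: Replaces A's build-the-whole-list-then-pop-blanks-from-both-ends strategy with a single stateful pass that discards leading blanks, buffers interior blanks in a pending counter flushed on the next non-blank line, and drops trailing blanks by never flushing them.
import Mathlib
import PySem

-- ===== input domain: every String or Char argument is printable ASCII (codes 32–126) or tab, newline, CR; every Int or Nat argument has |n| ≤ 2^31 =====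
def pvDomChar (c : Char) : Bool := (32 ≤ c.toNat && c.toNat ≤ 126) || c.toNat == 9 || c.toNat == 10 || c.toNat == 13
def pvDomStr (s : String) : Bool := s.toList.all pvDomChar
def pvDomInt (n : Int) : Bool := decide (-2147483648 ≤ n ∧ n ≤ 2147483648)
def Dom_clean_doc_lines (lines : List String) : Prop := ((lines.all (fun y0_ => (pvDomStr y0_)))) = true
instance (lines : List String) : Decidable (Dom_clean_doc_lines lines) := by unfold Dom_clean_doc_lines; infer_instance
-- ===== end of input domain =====

-- B replaces A's build-then-trim-both-ends strategy by a single stateful pass with a pending-blank counter (objective: alternative decomposition, same cost).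

-- ===== PORT A =====
def strip_br_suffix (text : String) : String × Bool :=
  let updated := PySem.Str.rstrip text
  if PySem.Str.endswith updated "[br]" then
    (PySem.Str.rstrip (PySem.Str.slice updated none (some (-4))), true)   -- updated[:-len("[br]")].rstrip()
  else (text, false)

-- `while cleaned and not cleaned[0]: cleaned.pop(0)`
def popLeadingBlanks : List String → List String
  | [] => []
  | x :: xs => if x = "" then popLeadingBlanks xs else x :: xs

-- `while cleaned and not cleaned[-1]: cleaned.pop()` (pop trailing blank entries)
def popTrailingBlanks : List String → List String
  | [] => []
  | x :: xs =>
    let rest := popTrailingBlanks xs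
    if rest = [] then (if x = "" then [] else [x]) else x :: rest

def clean_doc_lines (lines : List String) : List String :=
  let cleaned := lines.foldl (fun acc line =>
    let text := PySem.Str.strip line
    if text = "" then acc ++ [""]
    else acc ++ [(strip_br_suffix text).1]) ([] : List String)
  popTrailingBlanks (popLeadingBlanks cleaned)

-- ===== PORT B =====
def transform_alt (line : String) : String :=
  let text := PySem.Str.strip line
  if PySem.Str.endswith text "[br]" then
    PySem.Str.rstrip (PySem.Str.slice text none (some (-4)))
  else text

def clean_doc_lines_alt (lines : List String) : List String :=
  (lines.foldl (fun (st : List String × Nat) line =>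
      let text := transform_alt line
      if text = "" then
        (if st.1 = [] then st else (st.1, st.2 + 1))
      else (st.1 ++ List.replicate st.2 "" ++ [text], 0))
    ([], 0)).1

-- ===== PRECONDITION & SPEC =====
def Spec_clean_doc_lines (lines : List String) (out : List String) : Prop := out = clean_doc_lines_alt lines
instance (lines : List String) (out : List String) : Decidable (Spec_clean_doc_lines lines out) := by unfold Spec_clean_doc_lines; infer_instance

-- ===== CLAIM (what is proved, stated in full; the proofs are below) =====
def Claim_equal_clean_doc_lines : Prop := ∀ (lines : List String), Dom_clean_doc_lines lines → Spec_clean_doc_lines lines (clean_doc_lines lines)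

-- ===== LEMMAS AND PROOFS =====

-- A's per-line result, factored out for the proof
def fA (line : String) : String :=
  let text := PySem.Str.strip line
  if text = "" then "" else (strip_br_suffix text).1

theorem rstrip_strip (s : String) : PySem.Str.rstrip (PySem.Str.strip s) = PySem.Str.strip s := by
  unfold PySem.Str.rstrip PySem.Str.strip PySem.Chars.strip
  simp [List.dropWhile_idempotent, PySem.Chars.rstrip]

theorem fA_eq_transform_alt (line : String) : fA line = transform_alt line := by
  unfold fA transform_alt strip_br_suffix
  by_cases h : PySem.Str.strip line = ""
  · simp only [h]
    decide
  · simp only [if_neg h, rstrip_strip]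
    split_ifs <;> rfl

theorem foldA_eq_map (lines : List String) :
    lines.foldl (fun acc line =>
      let text := PySem.Str.strip line
      if text = "" then acc ++ [""]
      else acc ++ [(strip_br_suffix text).1]) ([] : List String) = lines.map fA := by
  have hbody : (fun (acc : List String) line =>
      let text := PySem.Str.strip line
      if text = "" then acc ++ [""]
      else acc ++ [(strip_br_suffix text).1]) = fun acc line => acc ++ [fA line] := by
    funext acc line
    unfold fA
    by_cases h : PySem.Str.strip line = "" <;> simp [h]
  rw [hbody, PySem.List.foldl_append_singleton_eq_map]
  simp

-- B's fold body applied to an already-transformed text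
def step2 (st : List String × Nat) (text : String) : List String × Nat :=
  if text = "" then (if st.1 = [] then st else (st.1, st.2 + 1))
  else (st.1 ++ List.replicate st.2 "" ++ [text], 0)

theorem alt_eq_foldl_map (lines : List String) :
    clean_doc_lines_alt lines = ((lines.map transform_alt).foldl step2 ([], 0)).1 := by
  unfold clean_doc_lines_alt
  rw [List.foldl_map]
  rfl

theorem popTrailing_replicate (n : Nat) : popTrailingBlanks (List.replicate n "") = [] := by
  induction n with
  | zero => rfl
  | succ n ih => simp [List.replicate_succ, popTrailingBlanks, ih]

theorem popTrailing_append_replicate (l : List String) (n : Nat) :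
    popTrailingBlanks (l ++ List.replicate n "") = popTrailingBlanks l := by
  induction l with
  | nil => simp [popTrailing_replicate, popTrailingBlanks]
  | cons x xs ih => simp [popTrailingBlanks, ih]

theorem popTrailing_concat_ne (l : List String) (t : String) (ht : t ≠ "") :
    popTrailingBlanks (l ++ [t]) = l ++ [t] := by
  induction l with
  | nil => simp [popTrailingBlanks, ht]
  | cons x xs ih => simp [popTrailingBlanks, ih]

theorem foldB_inner (ys acc : List String) (n : Nat) (h1 : acc ≠ [])
    (h2 : popTrailingBlanks acc = acc) :
    (ys.foldl step2 (acc, n)).1 = popTrailingBlanks (acc ++ List.replicate n "" ++ ys) := by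
  induction ys generalizing acc n with
  | nil => simp [popTrailing_append_replicate, h2]
  | cons t ys ih =>
    rw [List.foldl_cons]
    by_cases ht : t = ""
    · subst ht
      rw [show step2 (acc, n) "" = (acc, n + 1) from by simp [step2, h1]]
      rw [ih acc (n + 1) h1 h2]
      congr 1
      simp [List.replicate_succ']
    · rw [show step2 (acc, n) t = (acc ++ List.replicate n "" ++ [t], 0) from by
        simp [step2, ht]]
      rw [ih (acc ++ List.replicate n "" ++ [t]) 0 (by simp)
        (popTrailing_concat_ne (acc ++ List.replicate n "") t ht)]
      simp

theorem foldB_outer (ys : List String) :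
    ((ys).foldl step2 ([], 0)).1 = popTrailingBlanks (popLeadingBlanks ys) := by
  induction ys with
  | nil => rfl
  | cons t ys ih =>
    rw [List.foldl_cons]
    by_cases ht : t = ""
    · subst ht
      rw [show step2 ([], 0) "" = ([], 0) from rfl, ih,
        show popLeadingBlanks ("" :: ys) = popLeadingBlanks ys from by simp [popLeadingBlanks]]
    · rw [show step2 ([], 0) t = ([t], 0) from by simp [step2, ht]]
      rw [foldB_inner ys [t] 0 (by simp) (popTrailing_concat_ne [] t ht)]
      simp [popLeadingBlanks, ht]

-- ===== VERDICT (by name: the statement is the Claim_ definition above) =====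
theorem clean_doc_lines_spec : Claim_equal_clean_doc_lines := by
  intro lines _
  unfold Spec_clean_doc_lines clean_doc_lines
  rw [foldA_eq_map, alt_eq_foldl_map, foldB_outer]
  simp [List.map_congr_left (fun l _ => fA_eq_transform_alt l)]
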